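-- pv_equiv track=rewrite | github.com/mchouza/mchouza | misc/bounded_iteration/possible_examples.py | xor_bits_n
-- ===== SOURCE A (Python) =====
-- def identity(a):
--     return a
--
-- def add(a, b):
--     c = identity(a)
--     for i in range(b):
--         c += 1
--     return c
--
-- def sub(a, b):
--     c = identity(b)
--     d = identity(a)
--     d += 1
--     for i in range(d):
--         if c == a:
--             return i
--         c += 1
--     return 0
--
-- def shl_one(a):
--     return add(a, a)
--
-- def shr_one(a):
--     c = 0
--     for i in range(a):
--         if c == a:
--             return i
--         c += 1
--         if c == a:
--             return i
--         c += 1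
--     return 0
--
-- def is_even(a):
--     o = 1
--     z = 0
--     b = shr_one(a)
--     b = shl_one(b)
--     if b == a:
--         return o
--     return z
--
-- def is_odd(a):
--     o = 1
--     z = 0
--     e = is_even(a)
--     if e == z:
--         return o
--     return z
--
-- def reverse_bits_n(a, n):
--     r = 0
--     o = 0
--     o += 1
--     for i in range(n):
--         r = shl_one(r)
--         ao = is_odd(a)
--         if ao == o:
--             r += 1
--         a = shr_one(a)
--     return r
--
-- def xor_bits_n(a, b, n):
--     r = 0
--     o = 0
--     o += 1
--     for i in range(n):
--         al = is_odd(a)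
--         bl = is_odd(b)
--         blc = sub(o, bl)
--         a = shr_one(a)
--         b = shr_one(b)
--         r = shl_one(r)
--         if al == blc:
--             r += 1
--     r = reverse_bits_n(r, n)
--     return r
-- ===== SOURCE B (Python) =====
-- def xor_bits_n(a, b, n):
--     if n <= 0:
--         return 0
--     return (a ^ b) % (1 << n)
-- ===== Notes on version B (the rewrite author's own statement) =====
-- stated objective: faster
-- what changed: Replaces A's tower of unary-counting loops (add/sub/shr_one via +1 counters, per-bit odd tests, and a second bit-reversal pass) by the single direct expression (a ^ b) % (1 << n).
-- intended difference: On inputs with a < 0 or b < 0 and n > 0, A's unary helpers treat any negative number as the single bit '1' (is_odd=1, shr_one=0), e.g. A(-2,0,2)=1, while B returns the two's-complement masked XOR (-2^0)&3=2, the intended meaning of 'the lowest n bits'. — e.g. on xor_bits_n(-2, 0, 2): A returns 1, B returns 2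
import Mathlib
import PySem

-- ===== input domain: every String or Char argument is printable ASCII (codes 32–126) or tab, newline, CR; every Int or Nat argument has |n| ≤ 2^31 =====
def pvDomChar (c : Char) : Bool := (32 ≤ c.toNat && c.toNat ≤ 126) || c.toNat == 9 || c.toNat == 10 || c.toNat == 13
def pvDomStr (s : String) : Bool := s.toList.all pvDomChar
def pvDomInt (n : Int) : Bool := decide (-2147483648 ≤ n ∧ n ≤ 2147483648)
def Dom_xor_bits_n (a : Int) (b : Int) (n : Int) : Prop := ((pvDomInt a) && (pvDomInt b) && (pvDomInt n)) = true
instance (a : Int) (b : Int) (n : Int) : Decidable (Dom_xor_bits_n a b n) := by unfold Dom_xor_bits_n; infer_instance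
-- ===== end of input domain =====

-- B replaces A's unary-arithmetic bit loops by one direct masked XOR, (a ^ b) % (1 << n); objective: faster.

-- ===== PORT A =====
def pvIdentity (a : Int) : Int := a

def pvAdd (a : Int) (b : Int) : Int :=
  (PySem.List.pyRange 0 b 1).foldl (fun c _ => c + 1) (pvIdentity a)

def pvSubLoop (a : Int) : List Int → Int → Int
  | [], _ => 0
  | i :: rest, c => if c = a then i else pvSubLoop a rest (c + 1)

def pvSub (a : Int) (b : Int) : Int :=
  pvSubLoop a (PySem.List.pyRange 0 (pvIdentity a + 1) 1) (pvIdentity b)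

def pvShlOne (a : Int) : Int := pvAdd a a

def pvShrLoop (a : Int) : List Int → Int → Int
  | [], _ => 0
  | i :: rest, c => if c = a then i else if c + 1 = a then i else pvShrLoop a rest (c + 2)

def pvShrOne (a : Int) : Int := pvShrLoop a (PySem.List.pyRange 0 a 1) 0

def pvIsEven (a : Int) : Int := if pvShlOne (pvShrOne a) = a then 1 else 0

def pvIsOdd (a : Int) : Int := if pvIsEven a = 0 then 1 else 0

def pvReverseBitsN (a : Int) (n : Int) : Int :=
  ((PySem.List.pyRange 0 n 1).foldl (fun (s : Int × Int) _ =>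
      let r := pvShlOne s.1
      let ao := pvIsOdd s.2
      let r := if ao = 1 then r + 1 else r
      (r, pvShrOne s.2)) (0, a)).1

def xor_bits_n (a : Int) (b : Int) (n : Int) : Int :=
  let s := (PySem.List.pyRange 0 n 1).foldl (fun (s : Int × Int × Int) _ =>
      let al := pvIsOdd s.2.1
      let bl := pvIsOdd s.2.2
      let blc := pvSub 1 bl
      let a' := pvShrOne s.2.1
      let b' := pvShrOne s.2.2
      let r := pvShlOne s.1
      let r := if al = blc then r + 1 else r
      (r, a', b')) (0, a, b)
  pvReverseBitsN s.1 n

-- ===== PORT B =====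
def xor_bits_n_alt (a : Int) (b : Int) (n : Int) : Int :=
  if n ≤ 0 then 0
  else PySem.Int.mod (PySem.Int.bxor a b) (1 <<< n.toNat)

-- ===== PRECONDITION & SPEC =====
-- On negative a or b (with n > 0) A's unary helpers treat any negative number as the single bit
-- string '1' (is_odd(a)=1, shr_one(a)=0), while B uses Python's two's-complement bits, the
-- intended meaning of "the lowest n bits"; e.g. A(-2,0,2)=1 but (-2)^0 masked to 2 bits is 2.
def D_xor_bits_n (a : Int) (b : Int) (n : Int) : Prop := (a < 0 ∨ b < 0) ∧ 0 < n
instance (a : Int) (b : Int) (n : Int) : Decidable (D_xor_bits_n a b n) := by unfold D_xor_bits_n; infer_instance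

def Spec_xor_bits_n (a : Int) (b : Int) (n : Int) (out : Int) : Prop := ¬ D_xor_bits_n a b n → out = xor_bits_n_alt a b n
instance (a : Int) (b : Int) (n : Int) (out : Int) : Decidable (Spec_xor_bits_n a b n out) := by unfold Spec_xor_bits_n; infer_instance

def pvDiffWitness_xor_bits_n : Int × Int × Int := (-2, 0, 2)
def pvDiffWitnessOut_xor_bits_n : Int × Int := (1, 2)

-- ===== CLAIM (what is proved, stated in full; the proofs are below) =====
def Claim_unchanged_xor_bits_n : Prop := ∀ (a : Int) (b : Int) (n : Int), Dom_xor_bits_n a b n → Spec_xor_bits_n a b n (xor_bits_n a b n)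
def Claim_changed_xor_bits_n : Prop := Dom_xor_bits_n (pvDiffWitness_xor_bits_n.1) (pvDiffWitness_xor_bits_n.2.1) (pvDiffWitness_xor_bits_n.2.2) ∧ D_xor_bits_n (pvDiffWitness_xor_bits_n.1) (pvDiffWitness_xor_bits_n.2.1) (pvDiffWitness_xor_bits_n.2.2) ∧ xor_bits_n (pvDiffWitness_xor_bits_n.1) (pvDiffWitness_xor_bits_n.2.1) (pvDiffWitness_xor_bits_n.2.2) = pvDiffWitnessOut_xor_bits_n.1 ∧ xor_bits_n_alt (pvDiffWitness_xor_bits_n.1) (pvDiffWitness_xor_bits_n.2.1) (pvDiffWitness_xor_bits_n.2.2) = pvDiffWitnessOut_xor_bits_n.2 ∧ pvDiffWitnessOut_xor_bits_n.1 ≠ pvDiffWitnessOut_xor_bits_n.2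

-- ===== LEMMAS AND PROOFS =====

-- add(a, b) = a + b when 0 ≤ b (each loop turn adds 1)
lemma pvFoldAddOne : ∀ (l : List Int) (a : Int), l.foldl (fun c _ => c + 1) a = a + l.length
  | [], a => by simp
  | _ :: t, a => by
    simp only [List.foldl_cons, pvFoldAddOne t, List.length_cons]
    push_cast; ring

lemma pvAdd_spec (a b : Int) (hb : 0 ≤ b) : pvAdd a b = a + b := by
  unfold pvAdd pvIdentity
  rw [pvFoldAddOne, PySem.List.length_pyRange_one]
  omega

lemma pvShlOne_spec (a : Int) (ha : 0 ≤ a) : pvShlOne a = 2 * a := by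
  unfold pvShlOne; rw [pvAdd_spec a a ha]; ring

-- shr_one(a) = a / 2 for 0 ≤ a: the counter c holds 2·i at turn i
lemma pvShrLoop_spec : ∀ (m : Nat) (a k : Int), 0 ≤ k → k < a → 2 * k ≤ a → (a - k).toNat = m →
    pvShrLoop a (PySem.List.pyRange k a 1) (2 * k) = a / 2
  | 0, a, k, hk, hka, _, hm => by omega
  | m + 1, a, k, hk, hka, h2k, hm => by
    rw [PySem.List.pyRange_one_cons hka]
    unfold pvShrLoop
    by_cases h1 : 2 * k = a
    · simp [h1]; omega
    · by_cases h2 : 2 * k + 1 = a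
      · simp [h1, h2]; omega
      · have : 2 * k + 2 = 2 * (k + 1) := by ring
        simp only [h1, h2, if_false, this]
        exact pvShrLoop_spec m a (k + 1) (by omega) (by omega) (by omega) (by omega)

lemma pvShrOne_spec (a : Int) (ha : 0 ≤ a) : pvShrOne a = a / 2 := by
  unfold pvShrOne
  rcases eq_or_lt_of_le ha with h | h
  · rw [PySem.List.pyRange_one_eq_nil (by omega)]
    unfold pvShrLoop; omega
  · have := pvShrLoop_spec (a - 0).toNat a 0 le_rfl h (by omega) rfl
    simpa using this

lemma pvIsOdd_spec (a : Int) (ha : 0 ≤ a) : pvIsOdd a = a % 2 := by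
  unfold pvIsOdd pvIsEven
  rw [pvShrOne_spec a ha, pvShlOne_spec (a / 2) (by omega)]
  split_ifs with h1 h2 <;> omega

lemma pvSub_one_zero : pvSub 1 0 = 1 := by decide
lemma pvSub_one_one : pvSub 1 1 = 0 := by decide

-- a for-loop whose body ignores the loop index is an iterate
lemma pvFoldIter {S : Type} (g : S → S) (n : Int) (s : S) (_hn : 0 ≤ n) :
    (PySem.List.pyRange 0 n 1).foldl (fun s _ => g s) s = g^[n.toNat] s := by
  rw [List.foldl_const, PySem.List.length_pyRange_one]
  norm_num

-- the bit-reversal both loops of A compute: MSB-first accumulation of the n lowest bits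
def pvRevBits : Nat → Nat → Nat
  | 0, _ => 0
  | n + 1, x => x % 2 * 2 ^ n + pvRevBits n (x / 2)

lemma pvRevBits_lt : ∀ (n x : Nat), pvRevBits n x < 2 ^ n
  | 0, _ => by simp [pvRevBits]
  | n + 1, x => by
    have h1 := pvRevBits_lt n (x / 2)
    have h2 : x % 2 ≤ 1 := by omega
    have h3 : x % 2 * 2 ^ n ≤ 1 * 2 ^ n := Nat.mul_le_mul_right _ h2
    simp only [pvRevBits, pow_succ]
    omega

lemma pvRevBits_succ_right : ∀ (n x : Nat), pvRevBits (n + 1) x = 2 * pvRevBits n x + x / 2 ^ n % 2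
  | 0, x => by simp [pvRevBits]
  | n + 1, x => by
    have ih := pvRevBits_succ_right n (x / 2)
    have hd : x / 2 / 2 ^ n = x / 2 ^ (n + 1) := by
      rw [Nat.div_div_eq_div_mul, pow_succ']
    rw [show pvRevBits (n + 1 + 1) x = x % 2 * 2 ^ (n + 1) + pvRevBits (n + 1) (x / 2) from rfl,
      ih, hd, show pvRevBits (n + 1) x = x % 2 * 2 ^ n + pvRevBits n (x / 2) from rfl]
    ring

-- reversing twice returns the n lowest bits
lemma pvRevBits_revBits : ∀ (n x : Nat), pvRevBits n (pvRevBits n x) = x % 2 ^ n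
  | 0, x => by simp [pvRevBits]; omega
  | n + 1, x => by
    have hy : pvRevBits (n + 1) x = 2 * pvRevBits n x + x / 2 ^ n % 2 :=
      pvRevBits_succ_right n x
    have hb : x / 2 ^ n % 2 < 2 := Nat.mod_lt _ (by omega)
    have h1 : pvRevBits (n + 1) x % 2 = x / 2 ^ n % 2 := by omega
    have h2 : pvRevBits (n + 1) x / 2 = pvRevBits n x := by omega
    have hstep : pvRevBits (n + 1) (pvRevBits (n + 1) x)
        = pvRevBits (n + 1) x % 2 * 2 ^ n + pvRevBits n (pvRevBits (n + 1) x / 2) := rfl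
    have hmul : x % (2 ^ n * 2) = x % 2 ^ n + 2 ^ n * (x / 2 ^ n % 2) := Nat.mod_mul
    rw [hstep, h1, h2, pvRevBits_revBits n x, pow_succ, hmul]
    ring

-- the body of A's xor loop, as a step function on the state (r, a, b)
def pvXorStep (s : Int × Int × Int) : Int × Int × Int :=
  let al := pvIsOdd s.2.1
  let bl := pvIsOdd s.2.2
  let blc := pvSub 1 bl
  let a' := pvShrOne s.2.1
  let b' := pvShrOne s.2.2
  let r := pvShlOne s.1
  let r := if al = blc then r + 1 else r
  (r, a', b')

-- the body of reverse_bits_n's loop, as a step function on the state (r, a)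
def pvRevStep (s : Int × Int) : Int × Int :=
  let r := pvShlOne s.1
  let ao := pvIsOdd s.2
  let r := if ao = 1 then r + 1 else r
  (r, pvShrOne s.2)

lemma pvXorIter : ∀ (N : Nat) (r a b : Int), 0 ≤ r → 0 ≤ a → 0 ≤ b →
    (pvXorStep^[N] (r, a, b)).1 = r * 2 ^ N + ((pvRevBits N (a.toNat ^^^ b.toNat) : Nat) : Int)
  | 0, r, a, b, _, _, _ => by simp [pvRevBits]
  | N + 1, r, a, b, hr, ha, hb => by
    rw [Function.iterate_succ_apply]
    have hstep : pvXorStep (r, a, b) =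
        ((if a % 2 = (if b % 2 = 0 then 1 else 0) then 2 * r + 1 else 2 * r), a / 2, b / 2) := by
      unfold pvXorStep
      simp only [pvIsOdd_spec a ha, pvIsOdd_spec b hb, pvShrOne_spec a ha, pvShrOne_spec b hb,
        pvShlOne_spec r hr]
      rcases Int.emod_two_eq_zero_or_one b with h | h <;>
        simp [h, pvSub_one_zero, pvSub_one_one]
    rw [hstep]
    have hbit : (if a % 2 = (if b % 2 = 0 then 1 else 0) then (1 : Int) else 0)
        = (((a.toNat ^^^ b.toNat) % 2 : Nat) : Int) := by
      have hx : (a.toNat ^^^ b.toNat) % 2 = (a.toNat + b.toNat) % 2 := Nat.xor_mod_two_eq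
      rw [hx]
      rcases Int.emod_two_eq_zero_or_one a with h1 | h1 <;>
        rcases Int.emod_two_eq_zero_or_one b with h2 | h2 <;>
        simp [h1, h2] <;> omega
    have ih := pvXorIter N (if a % 2 = (if b % 2 = 0 then 1 else 0) then 2 * r + 1 else 2 * r)
      (a / 2) (b / 2) (by split_ifs <;> omega) (by omega) (by omega)
    rw [ih]
    have hhalf : (a / 2).toNat ^^^ (b / 2).toNat = (a.toNat ^^^ b.toNat) / 2 := by
      have h1 : (a / 2).toNat = a.toNat / 2 := by omega
      have h2 : (b / 2).toNat = b.toNat / 2 := by omega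
      have := Nat.shiftRight_xor_distrib (a := a.toNat) (b := b.toNat) (i := 1)
      simp only [Nat.shiftRight_one] at this
      rw [h1, h2, this]
    rw [hhalf]
    have hrb : pvRevBits (N + 1) (a.toNat ^^^ b.toNat)
        = (a.toNat ^^^ b.toNat) % 2 * 2 ^ N + pvRevBits N ((a.toNat ^^^ b.toNat) / 2) := rfl
    rw [hrb]
    have hsplit : (if a % 2 = (if b % 2 = 0 then 1 else 0) then 2 * r + 1 else 2 * r)
        = 2 * r + (if a % 2 = (if b % 2 = 0 then 1 else 0) then (1 : Int) else 0) := by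
      split_ifs <;> ring
    rw [hsplit, hbit]
    push_cast
    ring

lemma pvRevIter : ∀ (N : Nat) (r x : Int), 0 ≤ r → 0 ≤ x →
    (pvRevStep^[N] (r, x)).1 = r * 2 ^ N + ((pvRevBits N x.toNat : Nat) : Int)
  | 0, r, x, _, _ => by simp [pvRevBits]
  | N + 1, r, x, hr, hx => by
    rw [Function.iterate_succ_apply]
    have hstep : pvRevStep (r, x) = ((if x % 2 = 1 then 2 * r + 1 else 2 * r), x / 2) := by
      unfold pvRevStep
      simp only [pvIsOdd_spec x hx, pvShrOne_spec x hx, pvShlOne_spec r hr]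
    rw [hstep]
    have ih := pvRevIter N (if x % 2 = 1 then 2 * r + 1 else 2 * r) (x / 2)
      (by split_ifs <;> omega) (by omega)
    rw [ih]
    have h2 : (x / 2).toNat = x.toNat / 2 := by omega
    have hrb : pvRevBits (N + 1) x.toNat = x.toNat % 2 * 2 ^ N + pvRevBits N (x.toNat / 2) := rfl
    rw [h2, hrb]
    have hbit : (if x % 2 = 1 then (1 : Int) else 0) = ((x.toNat % 2 : Nat) : Int) := by
      split_ifs with h <;> omega
    have hsplit : (if x % 2 = 1 then 2 * r + 1 else 2 * r)
        = 2 * r + (if x % 2 = 1 then (1 : Int) else 0) := by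
      split_ifs <;> ring
    rw [hsplit, hbit]
    push_cast
    ring

lemma pvReverseBitsN_spec (x n : Int) (hx : 0 ≤ x) (hn : 0 ≤ n) :
    pvReverseBitsN x n = ((pvRevBits n.toNat x.toNat : Nat) : Int) := by
  unfold pvReverseBitsN
  change ((PySem.List.pyRange 0 n 1).foldl (fun s _ => pvRevStep s) (0, x)).1 = _
  rw [pvFoldIter pvRevStep n (0, x) hn, pvRevIter n.toNat 0 x le_rfl hx]
  simp

lemma pvAlt_nonneg_spec (a b n : Int) (ha : 0 ≤ a) (hb : 0 ≤ b) (hn : 0 < n) :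
    xor_bits_n_alt a b n = (((a.toNat ^^^ b.toNat) % 2 ^ n.toNat : Nat) : Int) := by
  unfold xor_bits_n_alt
  rw [if_neg (by omega)]
  rw [PySem.Int.bxor_of_nonneg ha hb]
  have hshift : (1 <<< n.toNat : Nat) = 2 ^ n.toNat := Nat.one_shiftLeft _
  rw [hshift, PySem.Int.mod_eq_emod_of_pos (by positivity)]
  push_cast
  ring

-- ===== VERDICT (by name: the statement is the Claim_ definition above) =====
theorem xor_bits_n_spec : Claim_unchanged_xor_bits_n := by
  intro a b n _ hnd
  by_cases hn : n ≤ 0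
  · show xor_bits_n a b n = xor_bits_n_alt a b n
    unfold xor_bits_n pvReverseBitsN xor_bits_n_alt
    rw [PySem.List.pyRange_one_eq_nil (by omega)]
    simp [hn]
  · have ha : 0 ≤ a := by unfold D_xor_bits_n at hnd; omega
    have hb : 0 ≤ b := by unfold D_xor_bits_n at hnd; omega
    show xor_bits_n a b n = xor_bits_n_alt a b n
    have hx : xor_bits_n a b n = pvReverseBitsN ((pvXorStep^[n.toNat] (0, a, b)).1) n := by
      unfold xor_bits_n
      change pvReverseBitsN (((PySem.List.pyRange 0 n 1).foldl (fun s _ => pvXorStep s) (0, a, b)).1) n = _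
      rw [pvFoldIter pvXorStep n (0, a, b) (by omega)]
    rw [hx, pvXorIter n.toNat 0 a b le_rfl ha hb]
    simp only [zero_mul, zero_add]
    rw [pvReverseBitsN_spec _ n (by positivity) (by omega), Int.toNat_natCast,
      pvRevBits_revBits, pvAlt_nonneg_spec a b n ha hb (by omega)]

theorem xor_bits_n_changed : Claim_changed_xor_bits_n := by
  unfold Claim_changed_xor_bits_n; decide
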